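-- pv_equiv track=rewrite | github.com/joaopalet/LEIC-IST | 1st_Year/FP/2nd_Project/proj2-86447.py | digramas
-- ===== SOURCE A (Python) =====
-- def digramas(mens):
--     '''Funcao que recebe como argumento uma cadeia de caracteres correspondente a uma mensagem (mens) e devolve a cadeia de caracteres correspondente aos diagramas transformados sem espacos'''
--     lst_mens = []
--     for e in mens:
--         if e != ' ':
--             lst_mens += e
--     def digramas_aux(lst_mens):
--         if lst_mens == []:
--             return ''
--         elif len(lst_mens) == 1:                    #se sobrar apenas um elemento, arescentar 'X'
--             return str(lst_mens[0]) + 'X'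
--         elif lst_mens[0] != lst_mens[1]:            #se os caracteres forem diferentes, ambos se mantem
--             return str(lst_mens[0]) + str(lst_mens[1]) + digramas_aux(lst_mens[2:])
--         else:                                       #se os caracteres forem iguais, acrescentar um 'X' mantendo o segundo caractere de seguida
--             return str(lst_mens[0]) + 'X' + digramas_aux(lst_mens[1:])
--     return digramas_aux(lst_mens)
-- ===== SOURCE B (Python) =====
-- def digramas(mens):
--     '''Single pass with a pending-character state machine; no list slicing, no recursion.'''
--     out = []
--     pending = None
--     for c in mens:
--         if c == ' ':
--             continue
--         if pending is None:
--             pending = c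
--         elif pending == c:
--             out.append(pending + 'X')
--             pending = c
--         else:
--             out.append(pending + c)
--             pending = None
--     if pending is not None:
--         out.append(pending + 'X')
--     return ''.join(out)
-- ===== Notes on version B (the rewrite author's own statement) =====
-- stated objective: faster
-- what changed: Replaces A's inner recursive helper that re-slices the remaining character list at each emitted pair with a single left-to-right pass keeping one pending-character state variable and appending finished digrams to an output list joined once.
import Mathlib
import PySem

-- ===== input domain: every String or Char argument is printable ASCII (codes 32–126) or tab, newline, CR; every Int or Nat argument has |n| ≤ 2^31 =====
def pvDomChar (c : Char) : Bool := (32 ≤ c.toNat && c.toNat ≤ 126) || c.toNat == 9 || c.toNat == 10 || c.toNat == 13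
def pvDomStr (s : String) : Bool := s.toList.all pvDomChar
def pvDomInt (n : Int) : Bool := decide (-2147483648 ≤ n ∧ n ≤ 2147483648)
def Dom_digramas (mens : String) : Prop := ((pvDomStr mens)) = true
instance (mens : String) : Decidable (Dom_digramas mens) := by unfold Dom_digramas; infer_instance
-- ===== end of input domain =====

-- B replaces A's recursive pair-splitting with slicing by a one-pass pending-character
-- state machine (objective: linear one-pass instead of A's quadratic slice-per-call recursion).

-- ===== PORT A =====
def digramasAux : List Char → String
  | [] => ""
  | [a] => String.ofList [a] ++ "X"
  | a :: b :: rest =>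
    if a ≠ b then String.ofList [a] ++ String.ofList [b] ++ digramasAux rest
    else String.ofList [a] ++ "X" ++ digramasAux (b :: rest)

def digramas (mens : String) : String :=
  digramasAux (mens.toList.foldl (fun acc e => if e ≠ ' ' then acc ++ [e] else acc) [])

-- ===== PORT B =====
def digramasStep (st : List String × Option Char) (c : Char) : List String × Option Char :=
  if c = ' ' then st
  else match st.2 with
    | none => (st.1, some c)
    | some p =>
      if p = c then (st.1 ++ [String.ofList [p, 'X']], some c)
      else (st.1 ++ [String.ofList [p, c]], none)

def digramas_alt (mens : String) : String :=
  let st := mens.toList.foldl digramasStep ([], none)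
  let out := match st.2 with
    | none => st.1
    | some p => st.1 ++ [String.ofList [p, 'X']]
  String.join out

-- ===== PRECONDITION & SPEC =====
def Spec_digramas (mens : String) (out : String) : Prop := out = digramas_alt mens
instance (mens : String) (out : String) : Decidable (Spec_digramas mens out) := by unfold Spec_digramas; infer_instance

-- ===== CLAIM (what is proved, stated in full; the proofs are below) =====
def Claim_equal_digramas : Prop := ∀ (mens : String), Dom_digramas mens → Spec_digramas mens (digramas mens)

-- ===== LEMMAS AND PROOFS =====

def pvFlush (st : List String × Option Char) : String :=
  String.join (match st.2 with
    | none => st.1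
    | some p => st.1 ++ [String.ofList [p, 'X']])

theorem pv_ofList_two (a b : Char) :
    String.ofList [a, b] = String.ofList [a] ++ String.ofList [b] := by
  rw [show [a, b] = [a] ++ [b] from rfl, String.ofList_append]

theorem pv_ofList_X : String.ofList ['X'] = "X" := by decide

theorem pv_join_append (a : List String) (s : String) :
    String.join (a ++ [s]) = String.join a ++ s := by
  simp [String.join]

-- A's accumulator loop is List.filter
theorem pvA_filter (l : List Char) (acc : List Char) :
    l.foldl (fun acc e => if e ≠ ' ' then acc ++ [e] else acc) acc
      = acc ++ l.filter (fun e => e ≠ ' ') := by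
  induction l generalizing acc with
  | nil => simp
  | cons c l ih =>
    simp only [List.foldl_cons]
    by_cases h : c = ' '
    · rw [if_neg (by simp [h]), ih]; simp [h]
    · rw [if_pos (by simp [h]), ih]; simp [h]

-- B's loop skips spaces, so it only sees the filtered list
theorem pvB_filter (l : List Char) (st : List String × Option Char) :
    l.foldl digramasStep st = (l.filter (fun e => e ≠ ' ')).foldl digramasStep st := by
  induction l generalizing st with
  | nil => rfl
  | cons c l ih =>
    by_cases h : c = ' ' <;> simp [List.filter, h, digramasStep, ih]

-- main invariant, both pending states at once, over space-free lists
theorem pv_invariant (l : List Char) (hl : ∀ x ∈ l, x ≠ ' ') :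
    (∀ acc, pvFlush (l.foldl digramasStep (acc, none))
        = String.join acc ++ digramasAux l)
    ∧ (∀ p acc, p ≠ ' ' → pvFlush (l.foldl digramasStep (acc, some p))
        = String.join acc ++ digramasAux (p :: l)) := by
  induction l with
  | nil =>
    constructor
    · intro acc; simp [pvFlush, digramasAux]
    · intro p acc _
      simp only [List.foldl_nil, pvFlush, digramasAux, pv_join_append]
      rw [pv_ofList_two, pv_ofList_X]
  | cons c l ih =>
    have hc : c ≠ ' ' := hl c (by simp)
    have hl' : ∀ x ∈ l, x ≠ ' ' := fun x hx => hl x (by simp [hx])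
    have ih' := ih hl'
    constructor
    · intro acc
      simp only [List.foldl_cons, digramasStep, if_neg hc]
      exact ih'.2 c acc hc
    · intro p acc hp
      simp only [List.foldl_cons, digramasStep, if_neg hc]
      by_cases hpc : p = c
      · subst hpc
        rw [if_pos rfl, ih'.2 p _ hc, pv_join_append]
        simp only [digramasAux, if_neg (by simp : ¬ p ≠ p)]
        rw [pv_ofList_two, pv_ofList_X, String.append_assoc]
      · rw [if_neg hpc, ih'.1, pv_join_append]
        simp only [digramasAux, if_pos (by simpa using hpc : p ≠ c)]
        rw [pv_ofList_two, String.append_assoc]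

-- ===== VERDICT (by name: the statement is the Claim_ definition above) =====
theorem digramas_spec : Claim_equal_digramas := by
  intro mens _
  unfold Spec_digramas digramas digramas_alt
  rw [pvA_filter, pvB_filter]
  have hl : ∀ x ∈ mens.toList.filter (fun e => e ≠ ' '), x ≠ ' ' := by
    intro x hx
    simpa using (List.of_mem_filter hx)
  have := (pv_invariant _ hl).1 []
  simp only [pvFlush] at this
  simpa [String.join] using this.symm
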